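-- pv_equiv track=rewrite | github.com/MrBrantCode/unitest_baseline | mut_generate/mist_train_cf/cf_13212/solution.py | find_control_characters
-- ===== SOURCE A (Python) =====
-- def find_control_characters(string):
--     control_characters = {
--         '\r': 'Carriage returns',
--         '\n': 'Line feeds',
--         '\t': 'Tabs'
--     }
--     control_character_counts = {character: 0 for character in control_characters}
--     control_character_positions = {character: [] for character in control_characters}
--
--     for i, char in enumerate(string):
--         if char in control_characters:
--             control_character_counts[char] += 1
--             control_character_positions[char].append(i)
--
--     return control_character_counts, control_character_positions
-- ===== SOURCE B (Python) =====
-- def find_control_characters(string):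
--     tracked = ['\r', '\n', '\t']
--     control_character_positions = {
--         c: [i for i, ch in enumerate(string) if ch == c] for c in tracked
--     }
--     control_character_counts = {c: len(control_character_positions[c]) for c in tracked}
--     return control_character_counts, control_character_positions
-- ===== Notes on version B (the rewrite author's own statement) =====
-- stated objective: simpler
-- what changed: B builds the positions dict first by per-character comprehensions over enumerate(string) and derives the counts as len(positions[c]), instead of maintaining two accumulating dicts in one combined pass.
import Mathlib
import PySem

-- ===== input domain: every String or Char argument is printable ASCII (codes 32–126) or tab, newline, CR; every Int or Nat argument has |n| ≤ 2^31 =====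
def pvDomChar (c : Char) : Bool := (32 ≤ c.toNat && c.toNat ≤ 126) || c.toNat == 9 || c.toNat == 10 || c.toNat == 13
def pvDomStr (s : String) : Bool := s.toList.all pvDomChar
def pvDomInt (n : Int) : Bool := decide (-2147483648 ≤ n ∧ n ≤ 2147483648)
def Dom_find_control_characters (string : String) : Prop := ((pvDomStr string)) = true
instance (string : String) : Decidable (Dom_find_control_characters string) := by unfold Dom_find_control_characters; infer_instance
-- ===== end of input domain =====

-- B builds the positions dict first (per-character comprehensions over enumerate) and derives
-- the counts as lengths of the position lists; A maintains both dicts in one accumulating pass.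

-- ===== PORT A =====
def find_control_characters (string : String) : (List (String × Int)) × (List (String × List Int)) :=
  let control_characters : PySem.Dict String String :=
    PySem.Dict.ofList [("\r", "Carriage returns"), ("\n", "Line feeds"), ("\t", "Tabs")]
  let counts0 : PySem.Dict String Int :=
    PySem.Dict.ofList (control_characters.keys.map (fun c => (c, 0)))
  let pos0 : PySem.Dict String (List Int) :=
    PySem.Dict.ofList (control_characters.keys.map (fun c => (c, [])))
  let st :=
    (PySem.List.enumerate string.toList).foldl
      (fun (st : PySem.Dict String Int × PySem.Dict String (List Int)) p =>
        let s := String.mk [p.2]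
        if control_characters.contains s then
          (st.1.modify s 0 (· + 1), st.2.modify s [] (· ++ [p.1]))
        else st)
      (counts0, pos0)
  (st.1.items, st.2.items)

-- ===== PORT B =====
def find_control_characters_alt (string : String) : (List (String × Int)) × (List (String × List Int)) :=
  let tracked : List String := ["\r", "\n", "\t"]
  let positions : List (String × List Int) :=
    tracked.map (fun c =>
      (c, ((PySem.List.enumerate string.toList).filter (fun p => String.mk [p.2] == c)).map (·.1)))
  let counts : List (String × Int) :=
    positions.map (fun q => (q.1, (q.2.length : Int)))
  (counts, positions)

-- ===== PRECONDITION & SPEC =====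
def Spec_find_control_characters (string : String) (out : (List (String × Int)) × (List (String × List Int))) : Prop := out = find_control_characters_alt string
instance (string : String) (out : (List (String × Int)) × (List (String × List Int))) : Decidable (Spec_find_control_characters string out) := by unfold Spec_find_control_characters; infer_instance

-- ===== CLAIM (what is proved, stated in full; the proofs are below) =====
def Claim_equal_find_control_characters : Prop := ∀ (string : String), Dom_find_control_characters string → Spec_find_control_characters string (find_control_characters string)

-- ===== LEMMAS AND PROOFS =====

theorem pvToList_mk (l : List Char) : (String.mk l).toList = l :=
  Eq.symm (String.ofList_eq.mp rfl)

-- positions contributed by a list of (index, char) pairs for one character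
def pvPos (l : List (Int × Char)) (c : Char) : List Int :=
  (l.filter (fun p => p.2 == c)).map (·.1)

theorem pvPos_cons (x : Int × Char) (l : List (Int × Char)) (c : Char) :
    pvPos (x :: l) c = (if x.2 == c then [x.1] else []) ++ pvPos l c := by
  simp only [pvPos, List.filter_cons]
  split <;> simp

def pvCC : PySem.Dict String String :=
  PySem.Dict.ofList [("\r", "Carriage returns"), ("\n", "Line feeds"), ("\t", "Tabs")]

theorem pvContains_r : pvCC.contains (String.mk ['\r']) = true := by decide
theorem pvContains_n : pvCC.contains (String.mk ['\n']) = true := by decide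
theorem pvContains_t : pvCC.contains (String.mk ['\t']) = true := by decide

theorem pvContains_other (ch : Char) (h1 : ch ≠ '\r') (h2 : ch ≠ '\n') (h3 : ch ≠ '\t') :
    pvCC.contains (String.mk [ch]) = false := by
  rw [show pvCC = PySem.Dict.mk [("\r", "Carriage returns"), ("\n", "Line feeds"), ("\t", "Tabs")] from by decide]
  simp [PySem.Dict.contains, String.ext_iff, pvToList_mk]
  exact ⟨Ne.symm h1, Ne.symm h2, Ne.symm h3⟩

theorem pvModR {α : Type} (a b c : α) (d0 : α) (f : α → α) :
    (PySem.Dict.mk [("\r", a), ("\n", b), ("\t", c)]).modify (String.mk ['\r']) d0 f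
    = PySem.Dict.mk [("\r", f a), ("\n", b), ("\t", c)] := by
  rw [show String.mk ['\r'] = "\r" from rfl]
  simp [PySem.Dict.modify, PySem.Dict.insert, PySem.Dict.getD, PySem.Dict.get?, PySem.Dict.contains]

theorem pvModN {α : Type} (a b c : α) (d0 : α) (f : α → α) :
    (PySem.Dict.mk [("\r", a), ("\n", b), ("\t", c)]).modify (String.mk ['\n']) d0 f
    = PySem.Dict.mk [("\r", a), ("\n", f b), ("\t", c)] := by
  rw [show String.mk ['\n'] = "\n" from rfl]
  simp [PySem.Dict.modify, PySem.Dict.insert, PySem.Dict.getD, PySem.Dict.get?, PySem.Dict.contains]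

theorem pvModT {α : Type} (a b c : α) (d0 : α) (f : α → α) :
    (PySem.Dict.mk [("\r", a), ("\n", b), ("\t", c)]).modify (String.mk ['\t']) d0 f
    = PySem.Dict.mk [("\r", a), ("\n", b), ("\t", f c)] := by
  rw [show String.mk ['\t'] = "\t" from rfl]
  simp [PySem.Dict.modify, PySem.Dict.insert, PySem.Dict.getD, PySem.Dict.get?, PySem.Dict.contains]

theorem pvLoop_eq (l : List (Int × Char)) :
    ∀ (cr cn ct : Int) (pr pn pt : List Int),
    l.foldl
      (fun (st : PySem.Dict String Int × PySem.Dict String (List Int)) p =>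
        let s := String.mk [p.2]
        if pvCC.contains s then
          (st.1.modify s 0 (· + 1), st.2.modify s [] (· ++ [p.1]))
        else st)
      (PySem.Dict.mk [("\r", cr), ("\n", cn), ("\t", ct)],
       PySem.Dict.mk [("\r", pr), ("\n", pn), ("\t", pt)])
    = (PySem.Dict.mk [("\r", cr + (pvPos l '\r').length), ("\n", cn + (pvPos l '\n').length), ("\t", ct + (pvPos l '\t').length)],
       PySem.Dict.mk [("\r", pr ++ pvPos l '\r'), ("\n", pn ++ pvPos l '\n'), ("\t", pt ++ pvPos l '\t')]) := by
  induction l with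
  | nil => intro cr cn ct pr pn pt; simp [pvPos]
  | cons x l ih =>
    intro cr cn ct pr pn pt
    obtain ⟨i, ch⟩ := x
    simp only [List.foldl_cons]
    by_cases h1 : ch = '\r'
    · subst h1
      simp only [pvContains_r, if_true, pvModR]
      rw [ih]
      simp [pvPos_cons]
      omega
    · by_cases h2 : ch = '\n'
      · subst h2
        simp only [pvContains_n, if_true, pvModN]
        rw [ih]
        simp [pvPos_cons]
        omega
      · by_cases h3 : ch = '\t'
        · subst h3
          simp only [pvContains_t, if_true, pvModT]
          rw [ih]
          simp [pvPos_cons]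
          omega
        · simp only [pvContains_other ch h1 h2 h3, Bool.false_eq_true, if_false]
          rw [ih]
          simp [pvPos_cons, h1, h2, h3]

theorem pvBeq_single (a b : Char) : (String.mk [a] == String.mk [b]) = (a == b) := by
  by_cases h : a = b
  · subst h; simp
  · simp [h]
    intro hs
    exact absurd (by simpa [pvToList_mk] using congrArg String.toList hs) h

theorem find_control_characters_spec : Claim_equal_find_control_characters := by
  intro string _
  unfold Spec_find_control_characters find_control_characters find_control_characters_alt
  simp only []
  rw [show (PySem.Dict.ofList ((PySem.Dict.ofList [("\r", "Carriage returns"), ("\n", "Line feeds"), ("\t", "Tabs")] : PySem.Dict String String).keys.map (fun c => (c, (0 : Int))))) = PySem.Dict.mk [("\r", 0), ("\n", 0), ("\t", 0)] from by decide]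
  rw [show (PySem.Dict.ofList ((PySem.Dict.ofList [("\r", "Carriage returns"), ("\n", "Line feeds"), ("\t", "Tabs")] : PySem.Dict String String).keys.map (fun c => (c, ([] : List Int))))) = PySem.Dict.mk [("\r", []), ("\n", []), ("\t", [])] from by decide]
  rw [show (PySem.Dict.ofList [("\r", "Carriage returns"), ("\n", "Line feeds"), ("\t", "Tabs")] : PySem.Dict String String) = pvCC from rfl]
  rw [pvLoop_eq]
  have hfil : ∀ c : Char,
      (PySem.List.enumerate string.toList).filter (fun p => String.mk [p.2] == String.mk [c])
      = (PySem.List.enumerate string.toList).filter (fun p => p.2 == c) := by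
    intro c
    exact List.filter_congr (fun p _ => pvBeq_single p.2 c)
  simp only [pvPos]
  rw [show ("\r" : String) = String.mk ['\r'] from rfl,
      show ("\n" : String) = String.mk ['\n'] from rfl,
      show ("\t" : String) = String.mk ['\t'] from rfl]
  simp [hfil]
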